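-- pv_equiv track=rewrite | github.com/durandal42/projects | aoc/2023/day10.py | explode_grid
-- ===== SOURCE A (Python) =====
-- TILE_EXPLOSIONS = {
--     '|': ['.|.',
--           '.|.',
--           '.|.'],
--     '-': ['...',
--           '---',
--           '...'],
--     'L': ['.|.',
--           '.L-',
--           '...'],
--     'J': ['.|.',
--           '-J.',
--           '...'],
--     '7': ['...',
--           '-7.',
--           '.|.'],
--     'F': ['...',
--           '.F-',
--           '.|.'],
--     '.': ['...',
--           '...',
--           '...'],
-- }
--
-- def explode_grid(grid):
--   exploded_grid = [[None] * len(grid[0]) * 3 for _ in range(len(grid) * 3)]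
--   for r, row in enumerate(grid):
--     for c, tile in enumerate(row):
--       exploded_tile = TILE_EXPLOSIONS[tile]
--       for dr in [0, 1, 2]:
--         for dc in [0, 1, 2]:
--           exploded_grid[3 * r + dr][3 * c + dc] = exploded_tile[dr][dc]
--   return exploded_grid
-- ===== SOURCE B (Python) =====
-- # B derives each 3x3 block from the pipe's connection directions instead of the
-- # 3x3 ASCII-art table: the centre is the tile itself, the edge midpoints carry
-- # '|'/'-' exactly when the tile connects N/S/E/W, corners are always '.'.
-- DIRECTIONS = {
--     '|': ['N', 'S'],
--     '-': ['E', 'W'],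
--     'L': ['N', 'E'],
--     'J': ['N', 'W'],
--     '7': ['S', 'W'],
--     'F': ['S', 'E'],
--     '.': [],
-- }
--
--
-- def explode_grid(grid):
--   out = []
--   for row in grid:
--     top, mid, bot = [], [], []
--     for tile in row:
--       d = DIRECTIONS[tile]
--       top += ['.', '|' if 'N' in d else '.', '.']
--       mid += ['-' if 'W' in d else '.', tile, '-' if 'E' in d else '.']
--       bot += ['.', '|' if 'S' in d else '.', '.']
--     out += [top, mid, bot]
--   return out
-- ===== Notes on version B (the rewrite author's own statement) =====
-- stated objective: alternative
-- what changed: B drops the TILE_EXPLOSIONS 3x3 ASCII-art table and synthesizes each block from a DIRECTIONS map of the pipe's connections (centre = the tile, edge midpoints '|'/'-' per N/S/E/W connectivity, corners '.'), appending three accumulated rows per input row instead of scatter-writing a preallocated None grid.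
import Mathlib
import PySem

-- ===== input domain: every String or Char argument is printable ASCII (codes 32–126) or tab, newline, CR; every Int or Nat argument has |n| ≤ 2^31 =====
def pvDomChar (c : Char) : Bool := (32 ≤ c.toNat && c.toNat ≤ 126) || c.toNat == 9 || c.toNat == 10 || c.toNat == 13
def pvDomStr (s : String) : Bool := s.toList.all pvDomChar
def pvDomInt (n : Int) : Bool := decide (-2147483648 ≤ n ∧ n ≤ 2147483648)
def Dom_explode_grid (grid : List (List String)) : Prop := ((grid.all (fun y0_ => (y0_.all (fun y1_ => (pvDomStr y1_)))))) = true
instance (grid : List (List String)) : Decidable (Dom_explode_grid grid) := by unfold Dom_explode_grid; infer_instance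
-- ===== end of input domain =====

-- B replaces A's TILE_EXPLOSIONS lookup table and scatter-writes into a preallocated
-- None grid by synthesizing each 3x3 block from the pipe's connection directions
-- (objective: alternative).

-- ===== PORT A =====
-- TILE_EXPLOSIONS (module constant of A)
def pvTileDict : PySem.Dict String (List String) := PySem.Dict.ofList
  [("|", [".|.", ".|.", ".|."]),
   ("-", ["...", "---", "..."]),
   ("L", [".|.", ".L-", "..."]),
   ("J", [".|.", "-J.", "..."]),
   ("7", ["...", "-7.", ".|."]),
   ("F", ["...", ".F-", ".|."]),
   (".", ["...", "...", "..."])]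

-- exploded_grid[i][j] = v  (read the row, set the cell, put the row back);
-- pyGetD/pySetD are exact while the indices are in range, which Pre_ guarantees
-- (a too-long row would make Python raise IndexError here — excluded by Pre_)
def pvWrite (eg : List (List (Option String))) (i j : Int) (v : String) : List (List (Option String)) :=
  PySem.List.pySetD eg i (PySem.List.pySetD (PySem.List.pyGetD eg i []) j (some v))

-- body of the 'for c, tile in enumerate(row)' loop (r = outer row index);
-- TILE_EXPLOSIONS[tile] with a missing key raises KeyError in Python — excluded by Pre_;
-- exploded_tile[dr][dc] is the 1-char string String.ofList [·] (indices 0..2 always in range)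
def pvTileBody (r : Int) (eg : List (List (Option String))) (ctile : Int × String) : List (List (Option String)) :=
  let et := (pvTileDict.get? ctile.2).getD []
  (([0, 1, 2] : List Int)).foldl (fun eg dr =>
    (([0, 1, 2] : List Int)).foldl (fun eg dc =>
      pvWrite eg (3 * r + dr) (3 * ctile.1 + dc)
        (((PySem.Str.pyGet? ((PySem.List.pyGet? et dr).getD "") dc).map
            (fun ch => String.ofList [ch])).getD "")) eg) eg

-- body of the 'for r, row in enumerate(grid)' loop
def pvRowBody (eg : List (List (Option String))) (rrow : Int × List String) : List (List (Option String)) :=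
  (PySem.List.enumerate rrow.2 0).foldl (pvTileBody rrow.1) eg

-- the None-filled cells are Option String; under Pre_ every cell is assigned, so the
-- final extraction's getD default is unreachable.  When grid = [] Python never
-- evaluates grid[0] (empty comprehension) and returns [] — as does replicate 0 here.
def explode_grid (grid : List (List String)) : List (List String) :=
  ((PySem.List.enumerate grid 0).foldl pvRowBody
      (List.replicate (grid.length * 3)
        (List.replicate ((PySem.List.pyGetD grid 0 []).length * 3) (none : Option String)))).map
    (fun row => row.map (fun cell => cell.getD ""))

-- ===== PORT B =====
-- DIRECTIONS (module constant of B): which directions each pipe tile connects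
def pvDirs : PySem.Dict String (List String) := PySem.Dict.ofList
  [("|", ["N", "S"]),
   ("-", ["E", "W"]),
   ("L", ["N", "E"]),
   ("J", ["N", "W"]),
   ("7", ["S", "W"]),
   ("F", ["S", "E"]),
   (".", [])]

-- inner loop of B: extend the three accumulated sub-rows by one tile's block
-- (DIRECTIONS[tile] with a missing key raises KeyError in Python — excluded by Pre_)
def pvTileTriple (acc : List String × List String × List String) (tile : String) :
    List String × List String × List String :=
  let d := (pvDirs.get? tile).getD []
  (acc.1 ++ [".", if "N" ∈ d then "|" else ".", "."],
   acc.2.1 ++ [if "W" ∈ d then "-" else ".", tile, if "E" ∈ d then "-" else "."],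
   acc.2.2 ++ [".", if "S" ∈ d then "|" else ".", "."])

-- 'top, mid, bot = [], [], []; for tile in row: …' — the row's three exploded sub-rows
def pvRowTriple (row : List String) : List String × List String × List String :=
  row.foldl pvTileTriple ([], [], [])

def explode_grid_alt (grid : List (List String)) : List (List String) :=
  grid.foldl (fun out row =>
    out ++ [(pvRowTriple row).1, (pvRowTriple row).2.1, (pvRowTriple row).2.2]) []

-- ===== PRECONDITION & SPEC =====
def pvKeys : List String := ["|", "-", "L", "J", "7", "F", "."]

-- Pre_ excludes ragged grids (a row longer than the first raises IndexError in A; a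
-- shorter one leaves None cells, which is not a List String) and unknown tiles (KeyError).
def Pre_explode_grid (grid : List (List String)) : Prop :=
  (∀ row ∈ grid, row.length = (grid.headD []).length) ∧ (∀ row ∈ grid, ∀ t ∈ row, t ∈ pvKeys)
instance (grid : List (List String)) : Decidable (Pre_explode_grid grid) := by
  unfold Pre_explode_grid; infer_instance

def pvWitness_explode_grid : List (List String) := [["F", "7"], ["L", "J"]]

def Spec_explode_grid (grid : List (List String)) (out : List (List String)) : Prop := out = explode_grid_alt grid
instance (grid : List (List String)) (out : List (List String)) : Decidable (Spec_explode_grid grid out) := by unfold Spec_explode_grid; infer_instance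

-- ===== CLAIM (what is proved, stated in full; the proofs are below) =====
def Claim_equal_explode_grid : Prop := ∀ (grid : List (List String)), Dom_explode_grid grid → Pre_explode_grid grid → Spec_explode_grid grid (explode_grid grid)

-- ===== LEMMAS AND PROOFS =====

-- the chars of TILE_EXPLOSIONS[tile][dr], as 1-char strings (A's tile sub-row)
def pvBlock (tile : String) (dr : Int) : List String :=
  ((PySem.List.pyGet? ((pvTileDict.get? tile).getD []) dr).getD "").toList.map
    (fun ch => String.ofList [ch])

-- the dr-th exploded sub-row of one input row / its cells wrapped in `some`
def eRow (row : List String) (dr : Int) : List String := row.flatMap (fun tile => pvBlock tile dr)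
def mRow (row : List String) (dr : Int) : List (Option String) := (eRow row dr).map some

lemma set_append_add {α : Type} (q s : List α) (k : Nat) (v : α) :
    (q ++ s).set (q.length + k) v = q ++ s.set k v := by
  induction q with
  | nil => simp
  | cons a q ih => simp [Nat.succ_add]

lemma getD_append_len {α : Type} (q : List α) (m : α) (r : List α) (d : α) :
    (q ++ m :: r).getD q.length d = m := by
  induction q with
  | nil => rfl
  | cons a q _ => simp

lemma write_at (pre : List (List (Option String))) (m : List (Option String))
    (r' : List (List (Option String))) (i j : Int) (v : String)
    (hi : i = (pre.length : Int)) :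
    pvWrite (pre ++ m :: r') i j v = pre ++ (PySem.List.pySetD m j (some v)) :: r' := by
  subst hi
  unfold pvWrite
  rw [PySem.List.pyGetD_natCast, PySem.List.pySetD_natCast, getD_append_len]
  simp

lemma write3 (pre : List (List (Option String))) (m : List (Option String))
    (rest : List (List (Option String))) (i j0 j1 j2 : Int) (v0 v1 v2 : String)
    (hi : i = (pre.length : Int)) :
    pvWrite (pvWrite (pvWrite (pre ++ m :: rest) i j0 v0) i j1 v1) i j2 v2
      = pre ++ (PySem.List.pySetD (PySem.List.pySetD (PySem.List.pySetD m j0 (some v0))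
          j1 (some v1)) j2 (some v2)) :: rest := by
  rw [write_at _ _ _ _ _ _ hi, write_at _ _ _ _ _ _ hi, write_at _ _ _ _ _ _ hi]

lemma setD3 (q : List (Option String)) (x y z : Option String) (u : List (Option String))
    (cn : Nat) (hq : q.length = 3 * cn) (j0 j1 j2 : Int)
    (hj0 : j0 = ((3 * cn : Nat) : Int)) (hj1 : j1 = ((3 * cn : Nat) : Int) + 1)
    (hj2 : j2 = ((3 * cn : Nat) : Int) + 2) (v0 v1 v2 : Option String) :
    PySem.List.pySetD (PySem.List.pySetD (PySem.List.pySetD (q ++ x :: y :: z :: u) j0 v0) j1 v1) j2 v2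
      = q ++ v0 :: v1 :: v2 :: u := by
  subst hj0 hj1 hj2
  have e1 : ((3 * cn : Nat) : Int) + 1 = ((3 * cn + 1 : Nat) : Int) := by push_cast; ring
  have e2 : ((3 * cn : Nat) : Int) + 2 = ((3 * cn + 2 : Nat) : Int) := by push_cast; ring
  rw [e1, e2, PySem.List.pySetD_natCast, PySem.List.pySetD_natCast, PySem.List.pySetD_natCast,
      ← hq]
  have k0 : (q ++ x :: y :: z :: u).set q.length v0 = q ++ v0 :: y :: z :: u := by
    simp
  have k1 : (q ++ v0 :: y :: z :: u).set (q.length + 1) v1 = q ++ v0 :: v1 :: z :: u := by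
    simp [set_append_add q (v0 :: y :: z :: u) 1 v1]
  have k2 : (q ++ v0 :: v1 :: z :: u).set (q.length + 2) v2 = q ++ v0 :: v1 :: v2 :: u := by
    simp [set_append_add q (v0 :: v1 :: z :: u) 2 v2]
  rw [k0, k1, k2]

lemma block3 : ∀ t ∈ pvKeys, ∀ dr ∈ ([0, 1, 2] : List Int),
    (pvBlock t dr).map some =
      [some (((PySem.Str.pyGet? ((PySem.List.pyGet? ((pvTileDict.get? t).getD []) dr).getD "") 0).map (fun ch => String.ofList [ch])).getD ""),
       some (((PySem.Str.pyGet? ((PySem.List.pyGet? ((pvTileDict.get? t).getD []) dr).getD "") 1).map (fun ch => String.ofList [ch])).getD ""),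
       some (((PySem.Str.pyGet? ((PySem.List.pyGet? ((pvTileDict.get? t).getD []) dr).getD "") 2).map (fun ch => String.ofList [ch])).getD "")] := by
  decide

lemma length_block (t : String) (ht : t ∈ pvKeys) (dr : Int) (hdr : dr ∈ ([0, 1, 2] : List Int)) :
    (pvBlock t dr).length = 3 := by
  simpa using congrArg List.length (block3 t ht dr hdr)

lemma assoc1 (pre : List (List (Option String))) (A B C : List (Option String))
    (post : List (List (Option String))) :
    pre ++ A :: B :: C :: post = (pre ++ [A]) ++ B :: C :: post := by simp

lemma assoc2 (pre : List (List (Option String))) (A B C : List (Option String))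
    (post : List (List (Option String))) :
    (pre ++ [A]) ++ B :: C :: post = (pre ++ [A, B]) ++ C :: post := by simp

lemma assoc3 (pre : List (List (Option String))) (A B C : List (Option String))
    (post : List (List (Option String))) :
    (pre ++ [A, B]) ++ C :: post = pre ++ [A, B, C] ++ post := by simp

lemma tile_step (t : String) (ht : t ∈ pvKeys) (rn cn : Nat)
    (pre post : List (List (Option String))) (q0 q1 q2 u0 u1 u2 : List (Option String))
    (x0 y0 z0 x1 y1 z1 x2 y2 z2 : Option String)
    (hpre : pre.length = 3 * rn) (h0 : q0.length = 3 * cn) (h1 : q1.length = 3 * cn)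
    (h2 : q2.length = 3 * cn) :
    pvTileBody (rn : Int)
      (pre ++ [q0 ++ x0 :: y0 :: z0 :: u0, q1 ++ x1 :: y1 :: z1 :: u1, q2 ++ x2 :: y2 :: z2 :: u2] ++ post)
      ((cn : Int), t)
    = pre ++ [q0 ++ (pvBlock t 0).map some ++ u0, q1 ++ (pvBlock t 1).map some ++ u1,
              q2 ++ (pvBlock t 2).map some ++ u2] ++ post := by
  have hcast : ((pre.length : Int)) = 3 * (rn : Int) := by rw [hpre]; push_cast; ring
  simp only [pvTileBody, List.foldl]
  rw [show (pre ++ [q0 ++ x0 :: y0 :: z0 :: u0, q1 ++ x1 :: y1 :: z1 :: u1, q2 ++ x2 :: y2 :: z2 :: u2] ++ post)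
        = pre ++ (q0 ++ x0 :: y0 :: z0 :: u0) :: (q1 ++ x1 :: y1 :: z1 :: u1) :: (q2 ++ x2 :: y2 :: z2 :: u2) :: post from by simp]
  rw [write3 _ _ _ _ _ _ _ _ _ _ (by rw [hcast]; ring)]
  rw [setD3 _ _ _ _ _ cn h0 _ _ _ (by push_cast; ring) (by push_cast; ring) (by push_cast; ring)]
  rw [assoc1]
  rw [write3 _ _ _ _ _ _ _ _ _ _ (by simp only [List.length_append, List.length_cons, List.length_nil, hpre]; push_cast; ring)]
  rw [setD3 _ _ _ _ _ cn h1 _ _ _ (by push_cast; ring) (by push_cast; ring) (by push_cast; ring)]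
  rw [assoc2]
  rw [write3 _ _ _ _ _ _ _ _ _ _ (by simp only [List.length_append, List.length_cons, List.length_nil, hpre]; push_cast; ring)]
  rw [setD3 _ _ _ _ _ cn h2 _ _ _ (by push_cast; ring) (by push_cast; ring) (by push_cast; ring)]
  rw [assoc3, block3 t ht 0 (by decide), block3 t ht 1 (by decide), block3 t ht 2 (by decide)]
  simp

lemma row_fold (row : List String) : ∀ (cn rn : Nat) (pre post : List (List (Option String)))
    (q0 q1 q2 : List (Option String)),
    (∀ t ∈ row, t ∈ pvKeys) → pre.length = 3 * rn → q0.length = 3 * cn →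
    q1.length = 3 * cn → q2.length = 3 * cn →
    (PySem.List.enumerate row (cn : Int)).foldl (pvTileBody (rn : Int))
      (pre ++ [q0 ++ List.replicate (3 * row.length) none,
               q1 ++ List.replicate (3 * row.length) none,
               q2 ++ List.replicate (3 * row.length) none] ++ post)
    = pre ++ [q0 ++ mRow row 0, q1 ++ mRow row 1, q2 ++ mRow row 2] ++ post := by
  induction row with
  | nil =>
    intro cn rn pre post q0 q1 q2 _ _ _ _ _
    simp [PySem.List.enumerate_nil, mRow, eRow]
  | cons t row ih =>
    intro cn rn pre post q0 q1 q2 htiles hpre h0 h1 h2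
    have ht : t ∈ pvKeys := htiles t (by simp)
    have hrep : List.replicate (3 * (t :: row).length) (none : Option String)
        = none :: none :: none :: List.replicate (3 * row.length) none := by
      have h3 : 3 * (t :: row).length = 3 + 3 * row.length := by simp [List.length_cons]; ring
      rw [h3, List.replicate_add]
      rfl
    rw [hrep, PySem.List.enumerate_cons, List.foldl_cons]
    rw [tile_step t ht rn cn pre post q0 q1 q2 _ _ _ _ _ _ _ _ _ _ _ _ hpre h0 h1 h2]
    have hc1 : ((cn : Int) + 1) = ((cn + 1 : Nat) : Int) := by push_cast; ring
    rw [hc1, ih (cn + 1) rn pre post (q0 ++ (pvBlock t 0).map some)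
          (q1 ++ (pvBlock t 1).map some) (q2 ++ (pvBlock t 2).map some)
          (fun x hx => htiles x (by simp [hx])) hpre
          (by simp [length_block t ht 0 (by decide)]; omega)
          (by simp [length_block t ht 1 (by decide)]; omega)
          (by simp [length_block t ht 2 (by decide)]; omega)]
    simp [mRow, eRow, List.flatMap_cons]

lemma grid_fold (rows : List (List String)) : ∀ (rn : Nat) (done : List (List (Option String))) (w : Nat),
    done.length = 3 * rn → (∀ row ∈ rows, row.length = w) →
    (∀ row ∈ rows, ∀ t ∈ row, t ∈ pvKeys) →
    (PySem.List.enumerate rows (rn : Int)).foldl pvRowBody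
      (done ++ List.replicate (3 * rows.length) (List.replicate (3 * w) (none : Option String)))
    = done ++ rows.flatMap (fun row => [mRow row 0, mRow row 1, mRow row 2]) := by
  induction rows with
  | nil => intro rn done w _ _ _; simp [PySem.List.enumerate_nil]
  | cons row rest ih =>
    intro rn done w hd hw htiles
    have hwr : row.length = w := hw row (by simp)
    have hrep : List.replicate (3 * (row :: rest).length) (List.replicate (3 * w) (none : Option String))
        = List.replicate (3 * w) none :: List.replicate (3 * w) none :: List.replicate (3 * w) none
            :: List.replicate (3 * rest.length) (List.replicate (3 * w) none) := by
      have h3 : 3 * (row :: rest).length = 3 + 3 * rest.length := by simp [List.length_cons]; ring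
      rw [h3, List.replicate_add]
      rfl
    rw [hrep, PySem.List.enumerate_cons, List.foldl_cons]
    have hbody : pvRowBody (done ++ List.replicate (3 * w) none :: List.replicate (3 * w) none
          :: List.replicate (3 * w) none :: List.replicate (3 * rest.length) (List.replicate (3 * w) none))
          ((rn : Int), row)
        = done ++ [mRow row 0, mRow row 1, mRow row 2]
            ++ List.replicate (3 * rest.length) (List.replicate (3 * w) none) := by
      have hr := row_fold row 0 rn done
        (List.replicate (3 * rest.length) (List.replicate (3 * w) none)) [] [] []
        (htiles row (by simp)) hd (by simp) (by simp) (by simp)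
      rw [hwr] at hr
      simp only [Nat.cast_zero] at hr
      unfold pvRowBody
      simpa using hr
    rw [hbody]
    have hc1 : ((rn : Int) + 1) = ((rn + 1 : Nat) : Int) := by push_cast; ring
    rw [show done ++ [mRow row 0, mRow row 1, mRow row 2]
          ++ List.replicate (3 * rest.length) (List.replicate (3 * w) (none : Option String))
        = (done ++ [mRow row 0, mRow row 1, mRow row 2])
          ++ List.replicate (3 * rest.length) (List.replicate (3 * w) none) from by simp]
    rw [hc1, ih (rn + 1) (done ++ [mRow row 0, mRow row 1, mRow row 2]) w
          (by simp [hd]; omega) (fun r hr => hw r (by simp [hr]))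
          (fun r hr => htiles r (by simp [hr]))]
    simp [List.flatMap_cons]

-- for a valid tile, B's connectivity-derived triple entries are exactly A's table sub-rows
lemma triple_eq_block : ∀ t ∈ pvKeys, ∀ (acc : List String × List String × List String),
    pvTileTriple acc t = (acc.1 ++ pvBlock t 0, acc.2.1 ++ pvBlock t 1, acc.2.2 ++ pvBlock t 2) := by
  intro t ht acc
  fin_cases ht <;> rfl

lemma tile_triple_fold (row : List String) : ∀ (a b c : List String), (∀ t ∈ row, t ∈ pvKeys) →
    row.foldl pvTileTriple (a, b, c) = (a ++ eRow row 0, b ++ eRow row 1, c ++ eRow row 2) := by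
  induction row with
  | nil => intro a b c _; simp [eRow]
  | cons t row ih =>
    intro a b c htiles
    rw [List.foldl_cons, triple_eq_block t (htiles t (by simp)) (a, b, c),
        ih _ _ _ (fun x hx => htiles x (by simp [hx]))]
    simp [eRow, List.flatMap_cons]

lemma alt_eq (grid : List (List String)) (htiles : ∀ row ∈ grid, ∀ t ∈ row, t ∈ pvKeys) :
    explode_grid_alt grid = grid.flatMap (fun row => [eRow row 0, eRow row 1, eRow row 2]) := by
  unfold explode_grid_alt
  have h1 : grid.foldl (fun out row =>
        out ++ [(pvRowTriple row).1, (pvRowTriple row).2.1, (pvRowTriple row).2.2]) []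
      = grid.foldl (fun out row => out ++ [eRow row 0, eRow row 1, eRow row 2]) [] := by
    apply PySem.List.foldl_congr_mem
    intro out row hrow
    simp only [pvRowTriple]
    rw [tile_triple_fold row [] [] [] (htiles row hrow)]
    simp
  rw [h1]
  rw [PySem.List.foldl_append_eq_flatMap]
  simp

-- ===== VERDICT (by name: the statement is the Claim_ definition above) =====
theorem explode_grid_spec : Claim_equal_explode_grid := by
  intro grid _ hpre
  obtain ⟨hrect, htiles⟩ := hpre
  unfold Spec_explode_grid
  rw [alt_eq grid htiles]
  cases grid with
  | nil => rfl
  | cons h rest =>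
    unfold explode_grid
    rw [PySem.List.pyGetD_zero_cons]
    have hmain := grid_fold (h :: rest) 0 [] h.length (by simp)
      (by intro r hr; simpa using hrect r hr) htiles
    simp only [Nat.cast_zero, List.nil_append] at hmain
    rw [show (h :: rest).length * 3 = 3 * (h :: rest).length from Nat.mul_comm _ _,
        show h.length * 3 = 3 * h.length from Nat.mul_comm _ _, hmain]
    simp [mRow, List.map_flatMap, List.map_map]
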